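-- pv_equiv track=rewrite | github.com/Ahmedhelmy006/nbo-linkedin-api | services/google_search.py | is_linkedin_url
-- ===== SOURCE A (Python) =====
-- def is_linkedin_url(url: str) -> bool:
--     """
--     Comprehensive check for LinkedIn URLs.
--     Captures various LinkedIn URL formats.
--
--     Args:
--         url: URL to check
--
--     Returns:
--         True if URL is a LinkedIn URL, False otherwise
--     """
--     linkedin_domains = [
--         'linkedin.com/in/',     # Standard profile URLs
--         'linkedin.com/company/', # Company pages
--         'linkedin.com/posts/',   # Posts
--         'linkedin.com/pulse/',   # Article links
--         'linkedin.com/groups/',  # Group pages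
--         'eg.linkedin.com/in/',   # Country-specific profile URLs
--         'linkedin.com/feed/',    # Feed links
--         'linkedin.com/mwlite/'   # Mobile web links
--     ]
--
--     # Convert URL to lowercase for case-insensitive matching
--     url_lower = url.lower()
--
--     # Check if any LinkedIn domain is in the URL
--     return any(domain in url_lower for domain in linkedin_domains)
-- ===== SOURCE B (Python) =====
-- def is_linkedin_url(url: str) -> bool:
--     """Single left-to-right scan: at each position test the common LinkedIn
--     stem once, then check which section follows, instead of running eight
--     independent substring searches."""
--     sections = ('in/', 'company/', 'posts/', 'pulse/', 'groups/', 'feed/', 'mwlite/')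
--     u = url.lower()
--     while u:
--         if u.startswith('linkedin.com/') and u[13:].startswith(sections):
--             return True
--         u = u[1:]
--     return False
-- ===== Notes on version B (the rewrite author's own statement) =====
-- stated objective: alternative
-- what changed: Replaces A's eight independent per-domain substring searches with a single left-to-right scan that matches the shared LinkedIn stem once per position and then checks which of seven section prefixes follows; the redundant country-prefixed entry disappears since any hit for it already contains the plain profile domain.
import Mathlib
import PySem

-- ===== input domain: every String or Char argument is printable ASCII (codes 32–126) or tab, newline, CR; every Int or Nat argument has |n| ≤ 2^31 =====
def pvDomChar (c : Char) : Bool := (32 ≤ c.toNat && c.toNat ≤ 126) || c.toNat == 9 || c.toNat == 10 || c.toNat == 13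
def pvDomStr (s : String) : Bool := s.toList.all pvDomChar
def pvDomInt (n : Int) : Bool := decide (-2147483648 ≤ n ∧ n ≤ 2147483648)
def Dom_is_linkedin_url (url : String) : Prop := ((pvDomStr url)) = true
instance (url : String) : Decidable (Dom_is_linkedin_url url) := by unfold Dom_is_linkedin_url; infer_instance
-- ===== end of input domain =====

-- B replaces A's eight independent substring searches by one left-to-right scan that matches
-- matches the shared LinkedIn stem once per position and then checks the seven section prefixes
-- (objective: alternative algorithm, same result).

-- ===== PORT A =====
def is_linkedin_url (url : String) : Bool :=
  let linkedin_domains : List String :=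
    [ "linkedin.com/in/", "linkedin.com/company/", "linkedin.com/posts/",
      "linkedin.com/pulse/", "linkedin.com/groups/", "eg.linkedin.com/in/",
      "linkedin.com/feed/", "linkedin.com/mwlite/" ]
  let url_lower := PySem.Str.lower url
  linkedin_domains.any (fun domain => PySem.Str.isIn domain url_lower)

-- ===== PORT B =====
def pvSections : List (List Char) :=
  [ "in/".toList, "company/".toList, "posts/".toList, "pulse/".toList,
    "groups/".toList, "feed/".toList, "mwlite/".toList ]

def pvStem : List Char := "linkedin.com/".toList

-- the `while u: … u = u[1:]` loop of Source B, as structural recursion on the char list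
def pvScan : List Char → Bool
  | [] => false
  | c :: rest =>
      ((PySem.Chars.startswith (c :: rest) pvStem &&
        pvSections.any (fun sec => PySem.Chars.startswith ((c :: rest).drop 13) sec))
       || pvScan rest)

def is_linkedin_url_alt (url : String) : Bool :=
  pvScan (PySem.Str.lower url).toList

-- ===== PRECONDITION & SPEC =====
def Spec_is_linkedin_url (url : String) (out : Bool) : Prop := out = is_linkedin_url_alt url
instance (url : String) (out : Bool) : Decidable (Spec_is_linkedin_url url out) := by unfold Spec_is_linkedin_url; infer_instance

-- ===== CLAIM (what is proved, stated in full; the proofs are below) =====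
def Claim_equal_is_linkedin_url : Prop := ∀ (url : String), Dom_is_linkedin_url url → Spec_is_linkedin_url url (is_linkedin_url url)

-- ===== LEMMAS AND PROOFS =====

-- (a ++ b) is a prefix of s iff a is, and b is a prefix of what remains
theorem pv_append_prefix_iff (a b s : List Char) :
    (a ++ b) <+: s ↔ a <+: s ∧ b <+: s.drop a.length := by
  constructor
  · rintro ⟨t, ht⟩
    subst ht
    refine ⟨⟨b ++ t, by simp⟩, ?_⟩
    simp
  · rintro ⟨⟨r, hr⟩, hb⟩
    subst hr
    simp only [List.drop_left] at hb
    exact (List.prefix_append_right_inj a).mpr hb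

-- one step of the scan: the head position matches iff some full domain is a prefix here
theorem pv_step_iff (s : List Char) :
    (PySem.Chars.startswith s pvStem &&
      pvSections.any (fun sec => PySem.Chars.startswith (s.drop 13) sec)) = true
    ↔ ∃ sec ∈ pvSections, (pvStem ++ sec) <+: s := by
  simp only [Bool.and_eq_true, List.any_eq_true, PySem.Chars.startswith_iff]
  constructor
  · rintro ⟨hst, sec, hmem, hsec⟩
    exact ⟨sec, hmem, (pv_append_prefix_iff _ _ _).mpr ⟨hst, by simpa [pvStem] using hsec⟩⟩
  · rintro ⟨sec, hmem, h⟩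
    obtain ⟨hst, hsec⟩ := (pv_append_prefix_iff _ _ _).mp h
    exact ⟨hst, sec, hmem, by simpa [pvStem] using hsec⟩

theorem pv_scan_iff (s : List Char) :
    pvScan s = true ↔ ∃ sec ∈ pvSections, (pvStem ++ sec) <:+: s := by
  induction s with
  | nil =>
      simp only [pvScan]
      constructor
      · intro h; cases h
      · rintro ⟨sec, hmem, h⟩
        have h2 := List.infix_nil.mp h
        simp [pvStem] at h2
  | cons c rest ih =>
      simp only [pvScan, Bool.or_eq_true, ih, pv_step_iff (c :: rest)]
      constructor
      · rintro (⟨sec, hmem, h⟩ | ⟨sec, hmem, h⟩)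
        · exact ⟨sec, hmem, h.isInfix⟩
        · exact ⟨sec, hmem, h.trans (List.suffix_cons c rest).isInfix⟩
      · rintro ⟨sec, hmem, t, u, h⟩
        cases t with
        | nil => exact Or.inl ⟨sec, hmem, ⟨u, by simpa using h⟩⟩
        | cons x t' =>
            refine Or.inr ⟨sec, hmem, t', u, ?_⟩
            simpa using congrArg List.tail h

-- A's eight-domain disjunction collapses to B's seven stem+section infix tests
theorem pv_main (u : List Char) :
    is_linkedin_url (String.ofList u) = is_linkedin_url_alt (String.ofList u) := by
  rw [Bool.eq_iff_iff]
  simp only [is_linkedin_url, is_linkedin_url_alt, List.any_eq_true, List.mem_cons,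
    List.not_mem_nil, or_false, PySem.Str.isIn_iff_infix, pv_scan_iff]
  constructor
  · rintro ⟨d, hd, hinf⟩
    have hlow := hinf
    rcases hd with h|h|h|h|h|h|h|h
    all_goals subst h
    · exact ⟨"in/".toList, by simp [pvSections], by simpa [pvStem] using hlow⟩
    · exact ⟨"company/".toList, by simp [pvSections], by simpa [pvStem] using hlow⟩
    · exact ⟨"posts/".toList, by simp [pvSections], by simpa [pvStem] using hlow⟩
    · exact ⟨"pulse/".toList, by simp [pvSections], by simpa [pvStem] using hlow⟩
    · exact ⟨"groups/".toList, by simp [pvSections], by simpa [pvStem] using hlow⟩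
    · -- 'eg.linkedin.com/in/' contains 'linkedin.com/in/' as a suffix
      refine ⟨"in/".toList, by simp [pvSections], ?_⟩
      have hsfx : (pvStem ++ "in/".toList) <:+: ("eg.linkedin.com/in/".toList) := by decide
      exact hsfx.trans (by simpa using hlow)
    · exact ⟨"feed/".toList, by simp [pvSections], by simpa [pvStem] using hlow⟩
    · exact ⟨"mwlite/".toList, by simp [pvSections], by simpa [pvStem] using hlow⟩
  · rintro ⟨sec, hmem, h⟩
    fin_cases hmem
    · exact ⟨"linkedin.com/in/", by simp, by simpa [pvStem] using h⟩
    · exact ⟨"linkedin.com/company/", by simp, by simpa [pvStem] using h⟩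
    · exact ⟨"linkedin.com/posts/", by simp, by simpa [pvStem] using h⟩
    · exact ⟨"linkedin.com/pulse/", by simp, by simpa [pvStem] using h⟩
    · exact ⟨"linkedin.com/groups/", by simp, by simpa [pvStem] using h⟩
    · exact ⟨"linkedin.com/feed/", by simp, by simpa [pvStem] using h⟩
    · exact ⟨"linkedin.com/mwlite/", by simp, by simpa [pvStem] using h⟩

-- ===== VERDICT (by name: the statement is the Claim_ definition above) =====
theorem is_linkedin_url_spec : Claim_equal_is_linkedin_url := by
  intro url _
  unfold Spec_is_linkedin_url
  have := pv_main url.toList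
  simpa using this
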